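-- pv_equiv track=rewrite | github.com/ChoiHongYeon/python_programmers_Lv.1 | 20240403-5.py | solution
-- ===== SOURCE A (Python) =====
-- def solution(s, skip, index):
--     skip_num=sorted([ord(i) for i in skip])
--     for j in range(len(skip)):
--         skip_num.append(skip_num[j]+26)
--     for k in range(len(skip)):
--         skip_num.append(skip_num[k]+52)
--
--     s_num=[ord(i) for i in s]
--
--     for a in range(len(s)):
--         for b in range(index):
--             l=True
--             while l==True:
--                 if s_num[a]+1 not in skip_num:
--                     s_num[a]+=1
--                     l=False
--                 else:
--                     s_num[a]+=1
--
--     for c in range(len(s)):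
--         while s_num[c]>122:
--             s_num[c]-=26
--
--     answer=''.join(chr(d) for d in s_num)
--
--     return answer
-- ===== SOURCE B (Python) =====
-- def solution(s, skip, index):
--     # distinct skip code points, with the same two wrap copies A uses
--     banned = sorted({ord(c) + d for c in skip for d in (0, 26, 52)})
--     n = index if index > 0 else 0
--     out = []
--     for ch in s:
--         v = ord(ch)
--         # the n-th non-banned integer above v: one ascending pass that
--         # extends the target by 1 for every banned value inside (v, f]
--         f = v + n
--         for x in banned:
--             if v < x <= f:
--                 f += 1
--         if f > 122:
--             f = (f - 97) % 26 + 97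
--         out.append(chr(f))
--     return ''.join(out)
-- ===== Notes on version B (the rewrite author's own statement) =====
-- stated objective: faster
-- what changed: Instead of advancing each character one code at a time (index iterations, each scanning the 3*len(skip) skip list, then a subtract-26 wrap loop), B builds the sorted set of banned codes once and, per character, computes the index-th non-banned code directly with a single ascending pass over that set, closing the wrap with one modulus.
import Mathlib
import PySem

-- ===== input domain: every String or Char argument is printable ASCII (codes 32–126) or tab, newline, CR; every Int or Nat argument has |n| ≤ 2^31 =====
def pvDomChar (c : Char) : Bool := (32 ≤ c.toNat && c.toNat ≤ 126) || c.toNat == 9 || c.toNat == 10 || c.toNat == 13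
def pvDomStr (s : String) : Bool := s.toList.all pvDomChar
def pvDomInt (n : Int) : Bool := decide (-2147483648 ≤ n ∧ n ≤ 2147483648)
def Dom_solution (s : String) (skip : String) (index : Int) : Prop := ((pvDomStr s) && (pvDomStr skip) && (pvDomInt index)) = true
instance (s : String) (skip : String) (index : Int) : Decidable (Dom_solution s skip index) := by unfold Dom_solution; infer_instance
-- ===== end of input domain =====

-- B replaces A's per-step linear scans (index × |skip| work per character) by one ascending
-- pass over the sorted distinct skip codes per character, jumping straight to the final code.

-- ===== PORT A =====

-- termination helper for the inner `while` loop of A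
theorem pvFiltLen_le (p q : Int → Bool) (t : List Int) (hpq : ∀ x, q x = true → p x = true) :
    (t.filter q).length ≤ (t.filter p).length :=
  (List.monotone_filter_right t hpq).length_le

theorem pvFiltLen_lt (S : List Int) (v : Int) (h : (v + 1) ∈ S) :
    (S.filter (fun x => decide (v + 1 < x))).length < (S.filter (fun x => decide (v < x))).length := by
  obtain ⟨l₁, l₂, rfl⟩ := List.append_of_mem h
  have m1 := pvFiltLen_le (fun x => decide (v < x)) (fun x => decide (v + 1 < x)) l₁ (by intro x hx; simp at hx ⊢; omega)
  have m2 := pvFiltLen_le (fun x => decide (v < x)) (fun x => decide (v + 1 < x)) l₂ (by intro x hx; simp at hx ⊢; omega)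
  simp [List.filter_append]
  omega

-- the `while` loop of A: advance to the next code not in skip_num
def stepA (S : List Int) (v : Int) : Int :=
  if (v + 1) ∈ S then stepA S (v + 1) else v + 1
termination_by (S.filter (fun x => decide (v < x))).length
decreasing_by exact pvFiltLen_lt S v (by assumption)

-- the final `while s_num[c]>122` loop of A
def wrapA (v : Int) : Int :=
  if v > 122 then wrapA (v - 26) else v
termination_by v.toNat
decreasing_by omega

-- skip_num: sorted ords, then the two append loops reading skip_num[j]
def skipNumA (sk : List Char) : List Int :=
  (PySem.List.pyRange 0 (sk.length : Int) 1).foldl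
    (fun acc k => acc ++ [(PySem.List.pyGet? acc k).getD 0 + 52])
    ((PySem.List.pyRange 0 (sk.length : Int) 1).foldl
      (fun acc j => acc ++ [(PySem.List.pyGet? acc j).getD 0 + 26])
      (PySem.List.sorted (sk.map (fun c => (c.toNat : Int))) (fun x => x) false))

def solution (s : String) (skip : String) (index : Int) : String :=
  let skipNum := skipNumA skip.toList
  let sNum := s.toList.map (fun c => (c.toNat : Int))
  let sNum2 := sNum.map (fun v => (PySem.List.pyRange 0 index 1).foldl (fun w _ => stepA skipNum w) v)
  let sNum3 := sNum2.map wrapA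
  String.ofList (sNum3.map (fun d => Char.ofNat d.toNat))

-- ===== PORT B =====

-- sorted({ord(c)+d for c in skip for d in (0,26,52)})
def bannedB (sk : List Char) : List Int :=
  PySem.List.sorted
    (PySem.Set.ofList (sk.flatMap (fun c => [((c.toNat : Int)), ((c.toNat : Int)) + 26, ((c.toNat : Int)) + 52])))
    (fun x => x) false

-- the single ascending pass: for x in banned: if v < x <= f: f += 1
def passB (v : Int) (banned : List Int) (f0 : Int) : Int :=
  banned.foldl (fun f x => if v < x ∧ x ≤ f then f + 1 else f) f0

def solution_alt (s : String) (skip : String) (index : Int) : String :=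
  let banned := bannedB skip.toList
  let n := if index > 0 then index else 0
  String.ofList (s.toList.map (fun ch =>
    let v : Int := ch.toNat
    let f := passB v banned (v + n)
    let f2 := if f > 122 then PySem.Int.mod (f - 97) 26 + 97 else f
    Char.ofNat f2.toNat))

-- ===== PRECONDITION & SPEC =====
def Spec_solution (s : String) (skip : String) (index : Int) (out : String) : Prop := out = solution_alt s skip index
instance (s : String) (skip : String) (index : Int) (out : String) : Decidable (Spec_solution s skip index out) := by unfold Spec_solution; infer_instance

-- ===== CLAIM (what is proved, stated in full; the proofs are below) =====
def Claim_equal_solution : Prop := ∀ (s : String) (skip : String) (index : Int), Dom_solution s skip index → Spec_solution s skip index (solution s skip index)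

-- ===== LEMMAS AND PROOFS =====

-- membership in the skip collections

theorem pvLoop1 (d : Int) (L : Nat) (acc : List Int) (h : L ≤ acc.length) :
    (PySem.List.pyRange 0 (L : Int) 1).foldl (fun a j => a ++ [(PySem.List.pyGet? a j).getD 0 + d]) acc
      = acc ++ (acc.take L).map (· + d) := by
  induction L with
  | zero => simp [PySem.List.pyRange_one_eq_nil (by omega : (0:Int) ≤ 0)]
  | succ L ih =>
    have hL : L < acc.length := h
    rw [show ((L + 1 : Nat) : Int) = (L : Int) + 1 by push_cast; ring,
      PySem.List.pyRange_one_succ_right (by positivity), List.foldl_append, ih (by omega)]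
    simp only [List.foldl_cons, List.foldl_nil]
    rw [PySem.List.pyGet?_natCast, List.getElem?_append_left hL, List.getElem?_eq_getElem hL]
    simp only [Option.getD_some]
    have hmt : List.map (fun x => x + d) (acc.take (L + 1))
        = List.map (fun x => x + d) (acc.take L) ++ [acc[L] + d] := by
      rw [List.take_add_one, List.getElem?_eq_getElem hL]
      simp only [Option.toList_some, List.map_append, List.map_cons, List.map_nil]
    rw [hmt, List.append_assoc]

theorem pvSkipNumA_eq (sk : List Char) :
    skipNumA sk =
      (PySem.List.sorted (sk.map (fun c => (c.toNat : Int))) (fun x => x) false) ++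
      (PySem.List.sorted (sk.map (fun c => (c.toNat : Int))) (fun x => x) false).map (· + 26) ++
      (PySem.List.sorted (sk.map (fun c => (c.toNat : Int))) (fun x => x) false).map (· + 52) := by
  unfold skipNumA
  have hlen : (PySem.List.sorted (sk.map (fun c => (c.toNat : Int))) (fun x => x) false).length = sk.length := by
    rw [PySem.List.length_sorted, List.length_map]
  rw [pvLoop1 26 sk.length _ (by omega), pvLoop1 52 sk.length _ (by
    simp only [List.length_append, List.length_map, List.length_take, hlen]; omega)]
  rw [List.take_of_length_le (by omega), List.take_left' hlen]

theorem pvMem_iff (sk : List Char) (w : Int) : w ∈ skipNumA sk ↔ w ∈ bannedB sk := by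
  rw [pvSkipNumA_eq]
  unfold bannedB
  simp only [List.mem_append, List.mem_map, PySem.List.mem_sorted, PySem.Set.mem_ofList,
    List.mem_flatMap, List.mem_cons]
  constructor
  · rintro ((⟨c, hc, rfl⟩ | ⟨a, ⟨c, hc, rfl⟩, rfl⟩) | ⟨a, ⟨c, hc, rfl⟩, rfl⟩)
    · exact ⟨c, hc, Or.inl rfl⟩
    · exact ⟨c, hc, Or.inr (Or.inl rfl)⟩
    · exact ⟨c, hc, Or.inr (Or.inr (Or.inl rfl))⟩
  · rintro ⟨c, hc, (rfl | rfl | rfl | h)⟩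
    · exact Or.inl (Or.inl ⟨c, hc, rfl⟩)
    · exact Or.inl (Or.inr ⟨_, ⟨c, hc, rfl⟩, rfl⟩)
    · exact Or.inr ⟨_, ⟨c, hc, rfl⟩, rfl⟩
    · cases h

theorem pvBanned_pairwise (sk : List Char) : (bannedB sk).Pairwise (· < ·) := by
  unfold bannedB
  exact PySem.List.sorted_ofList_pairwise_lt
    (sk.flatMap (fun c => [((c.toNat : Int)), ((c.toNat : Int)) + 26, ((c.toNat : Int)) + 52]))

-- characterization of A's inner while loop
theorem pvStepA_char (S : List Int) (v : Int) :
    v < stepA S v ∧ stepA S v ∉ S ∧ ∀ w, v < w → w < stepA S v → w ∈ S := by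
  fun_induction stepA S v with
  | case1 v h ih =>
    obtain ⟨h1, h2, h3⟩ := ih
    refine ⟨by omega, h2, fun w hw1 hw2 => ?_⟩
    by_cases hwe : w = v + 1
    · exact hwe ▸ h
    · exact h3 w (by omega) hw2
  | case2 v h =>
    exact ⟨by omega, h, fun w hw1 hw2 => absurd hw1 (by omega)⟩

-- counting in integer intervals
def pvCnt (S : List Int) (v g : Int) : Nat := (PySem.List.pyRange (v + 1) (g + 1) 1).countP (fun w => decide (w ∈ S))
def pvNcnt (S : List Int) (v g : Int) : Nat := (PySem.List.pyRange (v + 1) (g + 1) 1).countP (fun w => !decide (w ∈ S))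

theorem pvCnt_add_ncnt (S : List Int) (v g : Int) (h : v ≤ g) :
    (pvCnt S v g : Int) + (pvNcnt S v g : Int) = g - v := by
  unfold pvCnt pvNcnt
  have hlen := List.length_eq_countP_add_countP (fun w => decide (w ∈ S)) (l := PySem.List.pyRange (v + 1) (g + 1) 1)
  rw [PySem.List.length_pyRange_one] at hlen
  have hx : List.countP (fun a => decide ¬decide (a ∈ S) = true) (PySem.List.pyRange (v + 1) (g + 1) 1)
      = List.countP (fun w => !decide (w ∈ S)) (PySem.List.pyRange (v + 1) (g + 1) 1) :=
    List.countP_congr (fun a _ => by simp)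
  rw [hx] at hlen
  omega

theorem pvNcnt_split (S : List Int) (v m g : Int) (h1 : v ≤ m) (h2 : m ≤ g) :
    pvNcnt S v g = pvNcnt S v m + pvNcnt S m g := by
  unfold pvNcnt
  rw [PySem.List.pyRange_one_append (v + 1) (m + 1) (g + 1) (by omega) (by omega), List.countP_append]

-- characterization of A's index-fold
theorem pvIterA_spec (S : List Int) (v : Int) (n : Nat) :
    v ≤ (stepA S)^[n] v ∧ pvNcnt S v ((stepA S)^[n] v) = n ∧
      ∀ w, v ≤ w → w < (stepA S)^[n] v → pvNcnt S v w < n := by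
  induction n with
  | zero =>
    refine ⟨le_refl v, ?_, fun w hw1 hw2 => absurd hw1 (by simp at hw2 ⊢; omega)⟩
    simp only [Function.iterate_zero, id_eq, pvNcnt]
    rw [PySem.List.pyRange_one_eq_nil (by omega), List.countP_nil]
  | succ n ih =>
    obtain ⟨h1, h2, h3⟩ := ih
    set g := (stepA S)^[n] v with hg
    have hiter : (stepA S)^[n + 1] v = stepA S g := by
      rw [Function.iterate_succ_apply']
    obtain ⟨hl, hnm, hint⟩ := pvStepA_char S g
    have hone : pvNcnt S g (stepA S g) = 1 := by
      unfold pvNcnt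
      rw [PySem.List.pyRange_one_succ_right (by omega),
        List.countP_append, List.countP_eq_zero.mpr ?_, List.countP_cons]
      · simp [hnm]
      · intro u hu
        rw [PySem.List.mem_pyRange_one] at hu
        simp only [Bool.not_eq_true', decide_eq_false_iff_not, Decidable.not_not]
        exact hint u (by omega) (by omega)
    refine ⟨by omega, ?_, ?_⟩
    · rw [hiter, pvNcnt_split S v g (stepA S g) h1 (by omega), h2, hone]
    · intro w hw1 hw2
      rw [hiter] at hw2
      by_cases hwg : w < g
      · have := h3 w hw1 hwg; omega
      · have hz : pvNcnt S g w = 0 := by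
          unfold pvNcnt
          apply List.countP_eq_zero.mpr
          intro u hu
          rw [PySem.List.mem_pyRange_one] at hu
          simp only [Bool.not_eq_true', decide_eq_false_iff_not, Decidable.not_not]
          exact hint u (by omega) (by omega)
        rw [pvNcnt_split S v g w (by omega) (by omega), h2, hz]
        omega

-- B's one-pass loop
theorem pvPass_cons (v x : Int) (t : List Int) (f : Int) :
    passB v (x :: t) f = passB v t (if v < x ∧ x ≤ f then f + 1 else f) := rfl

theorem pvPass_mono (v : Int) (xs : List Int) (f : Int) : f ≤ passB v xs f := by
  induction xs generalizing f with
  | nil => simp [passB]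
  | cons x t ih =>
    rw [pvPass_cons]
    by_cases hc : v < x ∧ x ≤ f
    · rw [if_pos hc]; have := ih (f + 1); omega
    · rw [if_neg hc]; exact ih f

theorem pvPass_stay (v : Int) (xs : List Int) (f : Int) (h : ∀ x ∈ xs, f < x) : passB v xs f = f := by
  induction xs with
  | nil => rfl
  | cons x t ih =>
    rw [pvPass_cons]
    have hx : f < x := h x (List.mem_cons_self)
    rw [if_neg (by omega)]
    exact ih (fun y hy => h y (List.mem_cons_of_mem x hy))

theorem pvPass_spec (v : Int) (xs : List Int) (f : Int) (hs : xs.Pairwise (· < ·)) :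
    passB v xs f = f + (xs.countP (fun x => decide (v < x ∧ x ≤ passB v xs f)) : Int) ∧
      ∀ h, f ≤ h → h < passB v xs f → h < f + (xs.countP (fun x => decide (v < x ∧ x ≤ h)) : Int) := by
  induction xs generalizing f with
  | nil =>
    refine ⟨by simp [passB], fun h hh1 hh2 => ?_⟩
    simp [passB] at hh2
    omega
  | cons x t ih =>
    have hx : ∀ y ∈ t, x < y := (List.pairwise_cons.mp hs).1
    have hs' : t.Pairwise (· < ·) := (List.pairwise_cons.mp hs).2
    rw [pvPass_cons]
    by_cases hc : v < x ∧ x ≤ f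
    · rw [if_pos hc]
      obtain ⟨ha, hb⟩ := ih (f + 1) hs'
      have hmono := pvPass_mono v t (f + 1)
      have hcx : ∀ g : Int, x ≤ g →
          ((x :: t).countP (fun y => decide (v < y ∧ y ≤ g)) : Int)
            = (t.countP (fun y => decide (v < y ∧ y ≤ g)) : Int) + 1 := by
        intro g hg
        rw [List.countP_cons, if_pos (by simp; omega)]
        push_cast; ring
      constructor
      · rw [hcx _ (by omega)]; omega
      · intro h hh1 hh2
        by_cases hge : f + 1 ≤ h
        · have := hb h hge hh2
          rw [hcx _ (by omega)]
          omega
        · have hhf : h = f := by omega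
          rw [hcx _ (by omega)]
          have : (0:Int) ≤ (t.countP (fun y => decide (v < y ∧ y ≤ h)) : Int) := by positivity
          omega
    · rw [if_neg hc]
      by_cases hvx : v < x
      · have hfx : f < x := by omega
        have hstay : passB v t f = f := pvPass_stay v t f (fun y hy => by have := hx y hy; omega)
        rw [hstay]
        have hz : ∀ g : Int, g ≤ f →
            (x :: t).countP (fun y => decide (v < y ∧ y ≤ g)) = 0 := by
          intro g hg
          apply List.countP_eq_zero.mpr
          intro y hy
          rcases List.mem_cons.mp hy with rfl | hyt
          · simp; omega
          · have := hx y hyt; simp; omega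
        refine ⟨by rw [hz f (le_refl f)]; simp, fun h hh1 hh2 => absurd hh1 (by omega)⟩
      · have hcx : ∀ g : Int,
            (x :: t).countP (fun y => decide (v < y ∧ y ≤ g)) = t.countP (fun y => decide (v < y ∧ y ≤ g)) := by
          intro g
          rw [List.countP_cons, if_neg (by simp; omega)]
          simp
        obtain ⟨ha, hb⟩ := ih f hs'
        exact ⟨by rw [hcx]; exact ha, fun h hh1 hh2 => by rw [hcx]; exact hb h hh1 hh2⟩

theorem pvCountP_eq_cnt (S xs : List Int) (hnd : xs.Nodup) (hm : ∀ w, w ∈ xs ↔ w ∈ S) (v g : Int) :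
    xs.countP (fun x => decide (v < x ∧ x ≤ g)) = pvCnt S v g := by
  unfold pvCnt
  rw [List.countP_eq_length_filter, List.countP_eq_length_filter]
  have hperm : (xs.filter (fun x => decide (v < x ∧ x ≤ g))).Perm
      ((PySem.List.pyRange (v + 1) (g + 1) 1).filter (fun w => decide (w ∈ S))) := by
    rw [List.perm_ext_iff_of_nodup (hnd.filter _) (List.Nodup.filter _ (PySem.List.nodup_pyRange_one (v + 1) (g + 1)))]
    intro a
    simp only [List.mem_filter, PySem.List.mem_pyRange_one, decide_eq_true_eq]
    constructor
    · rintro ⟨haxs, hcond⟩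
      exact ⟨by omega, (hm a).mp haxs⟩
    · rintro ⟨hrange, hmem⟩
      exact ⟨(hm a).mpr hmem, by omega⟩
  exact hperm.length_eq

-- the per-character core: B's pass equals n applications of A's step
theorem pvKey (S xs : List Int) (hnd : xs.Nodup) (hm : ∀ w, w ∈ xs ↔ w ∈ S)
    (hs : xs.Pairwise (· < ·)) (v : Int) (n : Nat) :
    passB v xs (v + (n : Int)) = (stepA S)^[n] v := by
  obtain ⟨h1, h2, h3⟩ := pvIterA_spec S v n
  obtain ⟨ha, hb⟩ := pvPass_spec v xs (v + (n : Int)) hs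
  rw [pvCountP_eq_cnt S xs hnd hm] at ha
  set g := (stepA S)^[n] v with hgdef
  set p := passB v xs (v + (n : Int)) with hpdef
  have hcn : (pvCnt S v g : Int) + (pvNcnt S v g : Int) = g - v := pvCnt_add_ncnt S v g h1
  have hpge : v + (n : Int) ≤ p := pvPass_mono v xs (v + (n : Int))
  have hgge : v + (n : Int) ≤ g := by omega
  rcases lt_trichotomy p g with hlt | heq | hgt
  · exfalso
    have hcp : (pvCnt S v p : Int) + (pvNcnt S v p : Int) = p - v := pvCnt_add_ncnt S v p (by omega)
    have := h3 p (by omega) hlt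
    omega
  · exact heq
  · exfalso
    have := hb g hgge hgt
    rw [pvCountP_eq_cnt S xs hnd hm] at this
    omega

-- the wrap loop in closed form
theorem pvWrap_eq (v : Int) : wrapA v = if v > 122 then PySem.Int.mod (v - 97) 26 + 97 else v := by
  rw [PySem.Int.mod_eq_emod_of_pos (by norm_num)]
  fun_induction wrapA v with
  | case1 v hv ih =>
    rw [ih, if_pos hv]
    by_cases h2 : v - 26 > 122
    · rw [if_pos h2, show v - 26 - 97 = v - 97 - 26 by ring, Int.sub_emod_right]
    · rw [if_neg h2, show v - 97 = v - 123 + 1 * 26 by ring, Int.add_mul_emod_self_right,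
        Int.emod_eq_of_lt (by omega) (by omega)]
      omega
  | case2 v hv => rw [if_neg hv]

theorem pvFoldl_const {α β : Type} (l : List α) (f : β → β) (v : β) :
    l.foldl (fun a _ => f a) v = f^[l.length] v := by
  induction l generalizing v with
  | nil => rfl
  | cons x t ih => simp only [List.foldl_cons, List.length_cons, ih, Function.iterate_succ_apply]

-- ===== VERDICT (by name: the statement is the Claim_ definition above) =====
theorem solution_spec : Claim_equal_solution := by
  unfold Claim_equal_solution
  intro s skip index _
  unfold Spec_solution
  show solution s skip index = solution_alt s skip index
  unfold solution solution_alt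
  simp only [List.map_map]
  refine congrArg String.ofList (List.map_congr_left ?_)
  intro c _
  have hnd : (bannedB skip.toList).Nodup :=
    (pvBanned_pairwise skip.toList).imp (fun h => ne_of_lt h)
  have hm : ∀ w : Int, w ∈ bannedB skip.toList ↔ w ∈ skipNumA skip.toList :=
    fun w => (pvMem_iff skip.toList w).symm
  have hkey := pvKey (skipNumA skip.toList) (bannedB skip.toList) hnd hm
    (pvBanned_pairwise skip.toList) ((c.toNat : Int)) index.toNat
  have hfold := pvFoldl_const (PySem.List.pyRange 0 index 1)
    (stepA (skipNumA skip.toList)) ((c.toNat : Int))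
  have hlen : (PySem.List.pyRange 0 index 1).length = index.toNat := by
    rw [PySem.List.length_pyRange_one]; omega
  have hn : (if index > 0 then index else 0) = ((index.toNat : Nat) : Int) := by omega
  simp only [Function.comp_apply]
  rw [hfold, hlen, ← hkey, hn, pvWrap_eq]
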